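-- pv_equiv track=rewrite | github.com/Sukhrobjon/Hackerrank-Challanges | ProblemSolving/Algorithm/missing_nums.py | missing_numbers_v2
-- ===== SOURCE A (Python) =====
-- def missing_numbers_v2(arr, brr):
--     from collections import Counter
--     counter_a = Counter(arr)
--     counter_b = Counter(brr)
--     missing_nums = []
--     for key, _ in counter_b.items():
--         if key not in counter_a or counter_a[key] != counter_b[key]:
--             missing_nums.append(key)
--
--     return sorted(missing_nums)
-- ===== SOURCE B (Python) =====
-- def missing_numbers_v2(arr, brr):
--     sa = sorted(arr)
--     sb = sorted(brr)
--     res = []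
--     i, j, n, m = 0, 0, len(sa), len(sb)
--     while j < m:
--         v = sb[j]
--         cb = 0
--         while j < m and sb[j] == v:
--             cb += 1
--             j += 1
--         while i < n and sa[i] < v:
--             i += 1
--         ca = 0
--         while i < n and sa[i] == v:
--             ca += 1
--             i += 1
--         if ca != cb:
--             res.append(v)
--     return res
-- ===== Notes on version B (the rewrite author's own statement) =====
-- stated objective: alternative
-- what changed: B drops the Counter hash maps entirely: it sorts both arrays and does a two-pointer merge over runs, counting each runs length in brr and advancing a pointer through sorted arr to count the same value there, emitting mismatched values already in ascending order with no dict and no final sort.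
import Mathlib
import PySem

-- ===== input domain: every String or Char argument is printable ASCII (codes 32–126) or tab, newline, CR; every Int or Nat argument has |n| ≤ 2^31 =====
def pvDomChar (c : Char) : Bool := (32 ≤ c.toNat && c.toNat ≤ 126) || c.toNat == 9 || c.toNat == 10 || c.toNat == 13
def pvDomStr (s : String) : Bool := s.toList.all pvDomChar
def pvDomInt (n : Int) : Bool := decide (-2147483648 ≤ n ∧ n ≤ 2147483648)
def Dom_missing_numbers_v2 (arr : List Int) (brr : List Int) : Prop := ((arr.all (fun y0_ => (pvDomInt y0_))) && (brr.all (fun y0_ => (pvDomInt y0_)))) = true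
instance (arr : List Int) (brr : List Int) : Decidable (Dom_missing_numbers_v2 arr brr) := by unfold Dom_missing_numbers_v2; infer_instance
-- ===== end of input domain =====

-- B replaces A's two Counter hash maps and final sort by sorting both arrays and doing a
-- two-pointer merge over runs, so mismatched values come out already in order (objective: alternative).

-- ===== PORT A =====
def missing_numbers_v2 (arr : List Int) (brr : List Int) : List Int :=
  let counter_a := PySem.Dict.counter arr
  let counter_b := PySem.Dict.counter brr
  let missing_nums := counter_b.items.foldl
    (fun acc kv =>
      if counter_a.contains kv.1 = false ∨ counter_a.getD kv.1 0 ≠ counter_b.getD kv.1 0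
      then acc ++ [kv.1] else acc) []
  PySem.List.sorted missing_nums (fun x => x) false

-- ===== PORT B =====
-- the inner `while sb[j] == v` run-counting loop of Source B: (run length, rest after the run)
def pvTakeRun (v : Int) : List Int → Nat × List Int
  | [] => (0, [])
  | x :: t => if x = v then ((pvTakeRun v t).1 + 1, (pvTakeRun v t).2) else (0, x :: t)

-- the `while sa[i] < v: i += 1` pointer advance of Source B
def pvDropLt (v : Int) : List Int → List Int
  | [] => []
  | x :: t => if x < v then pvDropLt v t else x :: t

theorem pvTakeRun_length_le (v : Int) : ∀ l : List Int, (pvTakeRun v l).2.length ≤ l.length := by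
  intro l; induction l with
  | nil => simp [pvTakeRun]
  | cons x t ih =>
    by_cases h : x = v
    · simp only [pvTakeRun, if_pos h]; exact Nat.le_succ_of_le ih
    · simp [pvTakeRun, if_neg h]

-- Source B's outer while loop: process one run of sb per step, advancing both pointers
def pvMerge : List Int → List Int → List Int
  | _, [] => []
  | sa, v :: tb =>
    (if (pvTakeRun v (pvDropLt v sa)).1 ≠ (pvTakeRun v tb).1 + 1 then [v] else []) ++
      pvMerge (pvTakeRun v (pvDropLt v sa)).2 (pvTakeRun v tb).2
termination_by _ sb => sb.length
decreasing_by exact Nat.lt_succ_of_le (pvTakeRun_length_le _ _)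

def missing_numbers_v2_alt (arr : List Int) (brr : List Int) : List Int :=
  pvMerge (PySem.List.sorted arr (fun x => x) false) (PySem.List.sorted brr (fun x => x) false)

-- ===== PRECONDITION & SPEC =====
def Spec_missing_numbers_v2 (arr : List Int) (brr : List Int) (out : List Int) : Prop := out = missing_numbers_v2_alt arr brr
instance (arr : List Int) (brr : List Int) (out : List Int) : Decidable (Spec_missing_numbers_v2 arr brr out) := by unfold Spec_missing_numbers_v2; infer_instance

-- ===== CLAIM (what is proved, stated in full; the proofs are below) =====
def Claim_equal_missing_numbers_v2 : Prop := ∀ (arr : List Int) (brr : List Int), Dom_missing_numbers_v2 arr brr → Spec_missing_numbers_v2 arr brr (missing_numbers_v2 arr brr)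

-- ===== LEMMAS AND PROOFS =====

theorem pvDropLt_sublist (v : Int) : ∀ l : List Int, (pvDropLt v l).Sublist l := by
  intro l; induction l with
  | nil => simp [pvDropLt]
  | cons x t ih =>
    by_cases h : x < v
    · simp only [pvDropLt, if_pos h]; exact ih.cons x
    · simp [pvDropLt, if_neg h]

theorem pvTakeRun_sublist (v : Int) : ∀ l : List Int, (pvTakeRun v l).2.Sublist l := by
  intro l; induction l with
  | nil => simp [pvTakeRun]
  | cons x t ih =>
    by_cases h : x = v
    · simp only [pvTakeRun, if_pos h]; exact ih.cons x
    · simp [pvTakeRun, if_neg h]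

-- count of v is unchanged by dropping a prefix of elements < v
theorem count_pvDropLt (v : Int) : ∀ l : List Int, (pvDropLt v l).count v = l.count v := by
  intro l; induction l with
  | nil => rfl
  | cons x t ih =>
    by_cases h : x < v
    · have hne : x ≠ v := ne_of_lt h
      simp [pvDropLt, if_pos h, ih, hne]
    · simp [pvDropLt, if_neg h]

-- counting x > v is unchanged by dropping elements < v
theorem count_pvDropLt_gt (v x : Int) (hvx : v ≤ x) :
    ∀ l : List Int, (pvDropLt v l).count x = l.count x := by
  intro l; induction l with
  | nil => rfl
  | cons y t ih =>
    by_cases h : y < v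
    · have hne : y ≠ x := ne_of_lt (lt_of_lt_of_le h hvx)
      simp [pvDropLt, if_pos h, ih, hne]
    · simp [pvDropLt, if_neg h]

-- counting x ≠ v is unchanged by dropping the leading run of v's
theorem count_pvTakeRun_ne (v x : Int) (hne : x ≠ v) :
    ∀ l : List Int, (pvTakeRun v l).2.count x = l.count x := by
  intro l; induction l with
  | nil => rfl
  | cons y t ih =>
    by_cases h : y = v
    · have hyx : y ≠ x := by rw [h]; exact fun he => hne he.symm
      simp [pvTakeRun, if_pos h, ih, hyx]
    · simp [pvTakeRun, if_neg h]

-- on a sorted list whose elements are all ≥ v, the leading run is exactly the v's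
theorem pvTakeRun_count (v : Int) :
    ∀ l : List Int, l.Pairwise (· ≤ ·) → (∀ y ∈ l, v ≤ y) →
      (pvTakeRun v l).1 = l.count v := by
  intro l; induction l with
  | nil => intro _ _; rfl
  | cons y t ih =>
    intro hsort hge
    have hyt : ∀ z ∈ t, y ≤ z := fun z hz => (List.pairwise_cons.mp hsort).1 z hz
    have hsort' := (List.pairwise_cons.mp hsort).2
    by_cases h : y = v
    · have hge' : ∀ z ∈ t, v ≤ z := fun z hz => h ▸ hyt z hz
      simp [pvTakeRun, ih hsort' hge', h]
    · have hvy : v < y := lt_of_le_of_ne (hge y List.mem_cons_self) (fun he => h he.symm)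
      have hcnt : t.count v = 0 := by
        apply List.count_eq_zero.mpr
        intro hv
        exact absurd (hyt v hv) (not_le.mpr hvy)
      simp [pvTakeRun, h, hcnt]

-- elements remaining after the leading run of v's (on a sorted all-≥-v list) are > v
theorem pvTakeRun_rest_gt (v : Int) :
    ∀ l : List Int, l.Pairwise (· ≤ ·) → (∀ y ∈ l, v ≤ y) →
      ∀ w ∈ (pvTakeRun v l).2, v < w := by
  intro l; induction l with
  | nil => intro _ _ w hw; simp [pvTakeRun] at hw
  | cons y t ih =>
    intro hsort hge
    have hyt : ∀ z ∈ t, y ≤ z := fun z hz => (List.pairwise_cons.mp hsort).1 z hz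
    have hsort' := (List.pairwise_cons.mp hsort).2
    by_cases h : y = v
    · have hge' : ∀ z ∈ t, v ≤ z := fun z hz => h ▸ hyt z hz
      simpa [pvTakeRun, if_pos h] using ih hsort' hge'
    · have hvy : v < y := lt_of_le_of_ne (hge y List.mem_cons_self) (fun he => h he.symm)
      intro w hw
      simp only [pvTakeRun, if_neg h] at hw
      rcases List.mem_cons.mp hw with rfl | hw'
      · exact hvy
      · exact lt_of_lt_of_le hvy (hyt w hw')

-- elements of pvDropLt v l are ≥ v when l is sorted
theorem pvDropLt_ge (v : Int) :
    ∀ l : List Int, l.Pairwise (· ≤ ·) → ∀ w ∈ pvDropLt v l, v ≤ w := by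
  intro l; induction l with
  | nil => intro _ w hw; simp [pvDropLt] at hw
  | cons x t ih =>
    intro hsort
    have hxt : ∀ z ∈ t, x ≤ z := fun z hz => (List.pairwise_cons.mp hsort).1 z hz
    have hsort' := (List.pairwise_cons.mp hsort).2
    by_cases h : x < v
    · simpa [pvDropLt, if_pos h] using ih hsort'
    · intro w hw
      simp only [pvDropLt, if_neg h] at hw
      rcases List.mem_cons.mp hw with rfl | hw'
      · exact not_lt.mp h
      · exact le_trans (not_lt.mp h) (hxt w hw')

-- the count of v in arr seen by Source B's two inner loops equals arr.count v
theorem pvRunCount_eq (v : Int) (sa : List Int) (hsa : sa.Pairwise (· ≤ ·)) :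
    (pvTakeRun v (pvDropLt v sa)).1 = sa.count v := by
  have hsub := pvDropLt_sublist v sa
  have hsort' : (pvDropLt v sa).Pairwise (· ≤ ·) := hsa.sublist hsub
  rw [pvTakeRun_count v _ hsort' (pvDropLt_ge v sa hsa), count_pvDropLt]

-- remaining-arr counts for values x > v are untouched
theorem pvRest_count (v x : Int) (hvx : v < x) (sa : List Int) :
    (pvTakeRun v (pvDropLt v sa)).2.count x = sa.count x := by
  rw [count_pvTakeRun_ne v x (ne_of_gt hvx), count_pvDropLt_gt v x (le_of_lt hvx)]

-- main characterisation of the merge scan: membership + strict sortedness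
theorem pvMerge_main :
    ∀ sa sb : List Int, sa.Pairwise (· ≤ ·) → sb.Pairwise (· ≤ ·) →
      (∀ w, w ∈ pvMerge sa sb ↔ w ∈ sb ∧ sa.count w ≠ sb.count w) ∧
      (pvMerge sa sb).Pairwise (· < ·) := by
  intro sa sb
  induction sa, sb using pvMerge.induct with
  | case1 sa =>
    intro _ _
    refine ⟨fun w => ?_, by simp [pvMerge]⟩
    simp [pvMerge]
  | case2 sa v tb ih =>
    intro hsa hsb
    have hvtb : ∀ y ∈ tb, v ≤ y := fun y hy => (List.pairwise_cons.mp hsb).1 y hy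
    have hsb' := (List.pairwise_cons.mp hsb).2
    have hA2sort : (pvTakeRun v (pvDropLt v sa)).2.Pairwise (· ≤ ·) :=
      hsa.sublist ((pvTakeRun_sublist v _).trans (pvDropLt_sublist v sa))
    have hB2sort : (pvTakeRun v tb).2.Pairwise (· ≤ ·) := hsb'.sublist (pvTakeRun_sublist v tb)
    obtain ⟨ihmem, ihlt⟩ := ih hA2sort hB2sort
    have hca : (pvTakeRun v (pvDropLt v sa)).1 = sa.count v := pvRunCount_eq v sa hsa
    have hcb : (pvTakeRun v tb).1 = tb.count v := pvTakeRun_count v tb hsb' hvtb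
    have hB2gt : ∀ w ∈ (pvTakeRun v tb).2, v < w := pvTakeRun_rest_gt v tb hsb' hvtb
    have hB2sub : ∀ w ∈ (pvTakeRun v tb).2, w ∈ tb :=
      fun w hw => (pvTakeRun_sublist v tb).subset hw
    have hmerge_gt : ∀ w ∈ pvMerge (pvTakeRun v (pvDropLt v sa)).2 (pvTakeRun v tb).2, v < w :=
      fun w hw => hB2gt w ((ihmem w).mp hw).1
    have hunfold : pvMerge sa (v :: tb) =
        (if (pvTakeRun v (pvDropLt v sa)).1 ≠ (pvTakeRun v tb).1 + 1 then [v] else []) ++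
          pvMerge (pvTakeRun v (pvDropLt v sa)).2 (pvTakeRun v tb).2 := by
      rw [pvMerge]
    constructor
    · intro w
      rw [hunfold, List.mem_append]
      by_cases hwv : w = v
      · subst hwv
        have hnorec : w ∉ pvMerge (pvTakeRun w (pvDropLt w sa)).2 (pvTakeRun w tb).2 :=
          fun hw => lt_irrefl w (hmerge_gt w hw)
        constructor
        · rintro (hin | hin)
          · by_cases hc : (pvTakeRun w (pvDropLt w sa)).1 ≠ (pvTakeRun w tb).1 + 1
            · refine ⟨List.mem_cons_self, ?_⟩
              rw [hca, hcb] at hc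
              simp
              omega
            · rw [if_neg hc] at hin; simp at hin
          · exact absurd hin hnorec
        · rintro ⟨_, hcnt⟩
          left
          have : (pvTakeRun w (pvDropLt w sa)).1 ≠ (pvTakeRun w tb).1 + 1 := by
            rw [hca, hcb]
            simp at hcnt
            omega
          rw [if_pos this]; exact List.mem_singleton.mpr rfl
      · have hnin : w ∉ (if (pvTakeRun v (pvDropLt v sa)).1 ≠ (pvTakeRun v tb).1 + 1
            then [v] else ([] : List Int)) := by
          split <;> simp [hwv]
        have hvne : v ≠ w := fun he => hwv he.symm
        constructor
        · rintro (hin | hin)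
          · exact absurd hin hnin
          · obtain ⟨hmemB2, hcnt⟩ := (ihmem w).mp hin
            have hvw : v < w := hB2gt w hmemB2
            rw [pvRest_count v w hvw sa, count_pvTakeRun_ne v w hwv tb] at hcnt
            refine ⟨List.mem_cons_of_mem v (hB2sub w hmemB2), ?_⟩
            simpa [List.count_cons, hvne] using hcnt
        · rintro ⟨hmem, hcnt⟩
          rcases List.mem_cons.mp hmem with rfl | hmemtb
          · exact absurd rfl hwv
          · right
            have hvw : v < w := lt_of_le_of_ne (hvtb w hmemtb) (fun he => hwv he.symm)
            have hcnttb : 0 < tb.count w := List.count_pos_iff.mpr hmemtb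
            have hmemB2 : w ∈ (pvTakeRun v tb).2 := by
              apply List.count_pos_iff.mp
              rw [count_pvTakeRun_ne v w hwv tb]; exact hcnttb
            apply (ihmem w).mpr
            refine ⟨hmemB2, ?_⟩
            rw [pvRest_count v w hvw sa, count_pvTakeRun_ne v w hwv tb]
            simpa [List.count_cons, hvne] using hcnt
    · rw [hunfold]
      by_cases hc : (pvTakeRun v (pvDropLt v sa)).1 ≠ (pvTakeRun v tb).1 + 1
      · rw [if_pos hc, List.singleton_append]
        exact List.pairwise_cons.mpr ⟨hmerge_gt, ihlt⟩
      · rw [if_neg hc, List.nil_append]; exact ihlt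

-- ===== VERDICT (by name: the statement is the Claim_ definition above) =====
theorem missing_numbers_v2_spec : Claim_equal_missing_numbers_v2 := by
  intro arr brr _
  unfold Spec_missing_numbers_v2 missing_numbers_v2 missing_numbers_v2_alt
  dsimp only
  -- A side: the loop over counter_b.items is a filter of the distinct values of brr
  rw [PySem.List.foldl_append_ite
      (p := fun kv : Int × Int => (PySem.Dict.counter arr).contains kv.1 = false ∨
        (PySem.Dict.counter arr).getD kv.1 0 ≠ (PySem.Dict.counter brr).getD kv.1 0)
      (f := Prod.fst)]
  rw [PySem.Dict.items_counter, List.nil_append, List.filter_map, List.map_map]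
  have hcomp : (Prod.fst ∘ fun k : Int => (k, (List.count k brr : Int))) = id := rfl
  have hpred : ((fun kv : Int × Int => decide ((PySem.Dict.counter arr).contains kv.1 = false ∨
        (PySem.Dict.counter arr).getD kv.1 0 ≠ (PySem.Dict.counter brr).getD kv.1 0)) ∘
        fun k : Int => (k, (List.count k brr : Int))) =
      fun k : Int => decide ((PySem.Dict.counter arr).contains k = false ∨
        (PySem.Dict.counter arr).getD k 0 ≠ (PySem.Dict.counter brr).getD k 0) := rfl
  rw [hcomp, List.map_id, hpred]
  -- B side: characterise the two-pointer merge
  have hsa : (PySem.List.sorted arr (fun x => x) false).Pairwise (· ≤ ·) :=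
    PySem.List.sorted_pairwise arr (fun x => x)
  have hsb : (PySem.List.sorted brr (fun x => x) false).Pairwise (· ≤ ·) :=
    PySem.List.sorted_pairwise brr (fun x => x)
  obtain ⟨hmem, hlt⟩ := pvMerge_main _ _ hsa hsb
  set ys := pvMerge (PySem.List.sorted arr (fun x => x) false)
      (PySem.List.sorted brr (fun x => x) false) with hys
  have hmem' : ∀ w, w ∈ ys ↔ w ∈ brr ∧ arr.count w ≠ brr.count w := by
    intro w
    rw [hmem w,
      (PySem.List.sorted_perm brr (fun x => x) false).mem_iff,
      (PySem.List.sorted_perm arr (fun x => x) false).count_eq,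
      (PySem.List.sorted_perm brr (fun x => x) false).count_eq]
  have hnodupys : ys.Nodup := hlt.imp (fun h => ne_of_lt h)
  set xs := (PySem.Set.ofList brr).filter
      (fun k : Int => decide ((PySem.Dict.counter arr).contains k = false ∨
        (PySem.Dict.counter arr).getD k 0 ≠ (PySem.Dict.counter brr).getD k 0)) with hxs
  have hmemxs : ∀ w, w ∈ xs ↔ w ∈ brr ∧ arr.count w ≠ brr.count w := by
    intro w
    rw [hxs, List.mem_filter, PySem.Set.mem_ofList]
    constructor
    · rintro ⟨h1, h2⟩
      simp only [PySem.Dict.contains_counter, PySem.Dict.getD_counter,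
        decide_eq_true_eq] at h2
      rcases h2 with hna | hne
      · refine ⟨h1, ?_⟩
        have hnmem : w ∉ arr := by simpa [List.contains_eq_mem] using hna
        have harr : arr.count w = 0 := List.count_eq_zero.mpr hnmem
        have hbrr : 0 < brr.count w := List.count_pos_iff.mpr h1
        omega
      · exact ⟨h1, by exact_mod_cast hne⟩
    · rintro ⟨h1, h2⟩
      refine ⟨h1, ?_⟩
      simp only [PySem.Dict.contains_counter, PySem.Dict.getD_counter, decide_eq_true_eq]
      exact Or.inr (by exact_mod_cast h2)
  have hnodupxs : xs.Nodup := by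
    rw [hxs]; exact (PySem.Set.nodup_ofList brr).filter _
  have hperm : ys.Perm xs := by
    rw [List.perm_ext_iff_of_nodup hnodupys hnodupxs]
    intro w; rw [hmem' w, hmemxs w]
  exact PySem.List.sorted_eq_of_perm_of_pairwise_lt xs ys (fun x => x) hperm hlt
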